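-- pv_equiv track=rewrite | github.com/aejester/the-cynical-wordler | v3/word_filters.py | words_not_containing_chars
-- ===== SOURCE A (Python) =====
-- def words_not_containing_chars(words: list[str], guesses: list[list[tuple]]) -> list[str]:
--     correct = []
--
--     invalid_charset = set()
--
--     can_have = {}
--     cant_have = {}
--
--     for guess in guesses:
--         for i in range(len(guess)):
--             if guess[i][0] == 0:
--                 invalid_charset.add(guess[i][1])
--                 if guess[i][1] not in cant_have:
--                     cant_have[guess[i][1]] = [i]
--                 else:
--                     cant_have[guess[i][1]] += [i]
--             elif guess[i][0] == 2 or guess[i][0] == 1: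
--                 if guess[i][1] not in can_have:
--                     can_have[guess[i][1]] = [i]
--                 else:
--                     can_have[guess[i][1]] += [i]
--
--     for word in words:
--         passed_duplicates_tests = True
--
--         for i in range(len(word)):
--             if word[i] in can_have and word[i] in cant_have:
--                 if i in cant_have[word[i]]:
--                     passed_duplicates_tests = False
--         if passed_duplicates_tests:
--             valid = True
--             for i in range(len(word)):
--                 if word[i] in cant_have and i in cant_have[word[i]]:
--                     valid = False
--             if valid:
--                 correct.append(word)
--     return correct
-- ===== SOURCE B (Python) =====
-- def words_not_containing_chars(words: list[str], guesses: list[list[tuple]]) -> list[str]: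
--     # Progressively narrow the candidate list: each status-0 feedback entry (position i,
--     # char ch) removes every remaining word whose i-th character is ch. Each distinct
--     # constraint is applied only once, and constraints at positions past the longest
--     # word are vacuous and skipped. No lookup structure over words is ever built;
--     # statuses 1/2 never affect the result and are ignored.
--     maxlen = 0
--     for w in words:
--         maxlen = max(maxlen, len(w))
--     remaining = words
--     seen = set()
--     for guess in guesses:
--         for i, (status, ch) in enumerate(guess):
--             if status == 0 and i < maxlen and (i, ch) not in seen:
--                 seen.add((i, ch))
--                 remaining = [w for w in remaining if i >= len(w) or w[i] != ch]
--     return remaining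
-- ===== Notes on version B (the rewrite author's own statement) =====
-- stated objective: alternative
-- what changed: Instead of building two dicts of position lists and testing every word against them in two passes, B builds no lookup structure over the words: it streams the status-0 feedback entries and progressively filters the remaining word list by one (position, char) constraint at a time, applying each distinct constraint once, skipping constraints at positions past the longest word, and ignoring statuses 1/2 which never affect the result.
import Mathlib
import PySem

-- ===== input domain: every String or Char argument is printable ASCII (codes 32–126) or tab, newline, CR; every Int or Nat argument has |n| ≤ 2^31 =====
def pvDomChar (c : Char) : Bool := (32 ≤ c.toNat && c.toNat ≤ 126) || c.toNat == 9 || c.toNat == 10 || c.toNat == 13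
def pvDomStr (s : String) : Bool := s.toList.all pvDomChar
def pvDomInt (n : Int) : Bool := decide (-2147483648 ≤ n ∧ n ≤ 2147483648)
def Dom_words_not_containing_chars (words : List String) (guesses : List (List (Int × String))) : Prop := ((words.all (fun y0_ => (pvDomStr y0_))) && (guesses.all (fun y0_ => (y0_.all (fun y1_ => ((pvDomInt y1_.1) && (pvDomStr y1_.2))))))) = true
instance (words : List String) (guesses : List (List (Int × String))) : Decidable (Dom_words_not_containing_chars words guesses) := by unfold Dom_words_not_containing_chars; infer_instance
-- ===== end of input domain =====

-- B builds no lookup structure over the words: it streams the status-0 feedback entries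
-- and progressively filters the remaining word list one (position, char) constraint at a
-- time (each distinct constraint once; constraints past the longest word are vacuous and
-- skipped), replacing A's two dicts of position lists and its redundant two-pass per-word
-- check; return values agree on all inputs (A is total).

-- ===== PORT A =====
-- state of A's building loop: (invalid_charset, can_have, cant_have)
def pvAState : Type := PySem.Set String × PySem.Dict String (List Int) × PySem.Dict String (List Int)

-- one iteration of A's inner `for i in range(len(guess))` body (g = (i, guess[i]))
def pvAStep (st : pvAState) (g : Int × (Int × String)) : pvAState :=
  let (inv, can, cant) := st
  if g.2.1 == 0 then
    let inv := inv.add g.2.2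
    let cant :=
      if cant.contains g.2.2 = false then cant.insert g.2.2 [g.1]
      else cant.insert g.2.2 (cant.getD g.2.2 [] ++ [g.1])
    (inv, can, cant)
  else if g.2.1 == 2 || g.2.1 == 1 then
    let can :=
      if can.contains g.2.2 = false then can.insert g.2.2 [g.1]
      else can.insert g.2.2 (can.getD g.2.2 [] ++ [g.1])
    (inv, can, cant)
  else (inv, can, cant)

def words_not_containing_chars (words : List String) (guesses : List (List (Int × String))) : List String :=
  let st : pvAState := (PySem.Set.empty, PySem.Dict.empty, PySem.Dict.empty)
  let st := guesses.foldl (fun st guess => (PySem.List.enumerate guess).foldl pvAStep st) st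
  let can := st.2.1
  let cant := st.2.2
  words.foldl (fun correct word =>
    if (PySem.List.enumerate word.toList).foldl (fun passed p =>
        if can.contains (String.singleton p.2) && cant.contains (String.singleton p.2) then
          if (cant.getD (String.singleton p.2) []).contains p.1 then false else passed
        else passed) true then
      if (PySem.List.enumerate word.toList).foldl (fun valid p =>
          if cant.contains (String.singleton p.2) then
            if (cant.getD (String.singleton p.2) []).contains p.1 then false else valid
          else valid) true then
        correct ++ [word]
      else correct
    else correct) []

-- ===== PORT B =====
-- B's per-constraint keep test for c = (i, ch): `i >= len(w) or w[i] != ch`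
def pvKeepC (c : Int × String) (w : String) : Bool :=
  decide ((w.toList.length : Int) ≤ c.1)
    || !((PySem.List.pyGet? w.toList c.1).map String.singleton == some c.2)

-- one iteration of B's inner loop body on the state (seen, remaining), p = (i, (status, ch))
def pvBStep (maxlen : Int) (st : PySem.Set (Int × String) × List String)
    (p : Int × (Int × String)) : PySem.Set (Int × String) × List String :=
  if p.2.1 == 0 && decide (p.1 < maxlen) && !(st.1.contains (p.1, p.2.2)) then
    (st.1.add (p.1, p.2.2), st.2.filter (pvKeepC (p.1, p.2.2)))
  else st

def words_not_containing_chars_alt (words : List String) (guesses : List (List (Int × String))) : List String :=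
  let maxlen : Int := words.foldl (fun m w => max m (w.toList.length : Int)) 0
  (guesses.foldl (fun st guess => (PySem.List.enumerate guess).foldl (pvBStep maxlen) st)
    ((PySem.Set.empty : PySem.Set (Int × String)), words)).2

-- ===== PRECONDITION & SPEC =====
def Spec_words_not_containing_chars (words : List String) (guesses : List (List (Int × String))) (out : List String) : Prop := out = words_not_containing_chars_alt words guesses
instance (words : List String) (guesses : List (List (Int × String))) (out : List String) : Decidable (Spec_words_not_containing_chars words guesses out) := by unfold Spec_words_not_containing_chars; infer_instance

-- ===== CLAIM (what is proved, stated in full; the proofs are below) =====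
def Claim_equal_words_not_containing_chars : Prop := ∀ (words : List String) (guesses : List (List (Int × String))), Dom_words_not_containing_chars words guesses → Spec_words_not_containing_chars words guesses (words_not_containing_chars words guesses)

-- ===== LEMMAS AND PROOFS =====

-- the set of (char, position) pairs that any status-0 feedback entry bans
def pvBanned (guesses : List (List (Int × String))) : PySem.Set (String × Int) :=
  guesses.foldl (fun b guess =>
    (PySem.List.enumerate guess).foldl (fun b g =>
      if g.2.1 == 0 then b.add (g.2.2, g.1) else b) b) PySem.Set.empty

-- the invariant linking A's cant_have dict to the banned set
def pvInv (cant : PySem.Dict String (List Int)) (b : PySem.Set (String × Int)) : Prop :=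
  ∀ (s : String) (i : Int), (s, i) ∈ b ↔ i ∈ cant.getD s []

theorem pvInv_step (st : pvAState) (b : PySem.Set (String × Int)) (g : Int × (Int × String))
    (h : pvInv st.2.2 b) :
    pvInv (pvAStep st g).2.2 (if g.2.1 == 0 then b.add (g.2.2, g.1) else b) := by
  obtain ⟨inv, can, cant⟩ := st
  simp only at h
  intro s i
  by_cases h0 : g.2.1 = 0
  · simp only [pvAStep, h0, beq_self_eq_true, if_true, PySem.Set.mem_add]
    by_cases hc : cant.contains g.2.2 = true
    · rw [if_neg (by simp [hc]), PySem.Dict.getD_insert]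
      by_cases hs : s = g.2.2
      · subst hs
        rw [if_pos rfl]
        simp only [List.mem_append, List.mem_cons, List.not_mem_nil, or_false, Prod.mk.injEq,
          true_and]
        rw [h g.2.2 i]
      · rw [if_neg hs]
        simp only [Prod.mk.injEq]
        rw [h s i]
        simp [hs]
    · simp only [Bool.not_eq_true] at hc
      rw [if_pos (by simp [hc]), PySem.Dict.getD_insert]
      by_cases hs : s = g.2.2
      · subst hs
        rw [if_pos rfl]
        have hb0 := h g.2.2 i
        rw [PySem.Dict.getD_of_not_contains _ _ hc] at hb0
        simp only [List.not_mem_nil, iff_false] at hb0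
        simp [hb0, Prod.ext_iff]
      · rw [if_neg hs]
        simp only [Prod.mk.injEq]
        rw [h s i]
        simp [hs]
  · have hb : (g.2.1 == 0) = false := by simp [h0]
    rw [if_neg (by simp [h0])]
    by_cases h2 : g.2.1 = 2
    · simp only [pvAStep, h2, beq_self_eq_true, Bool.true_or, if_true]
      exact h s i
    · by_cases h1 : g.2.1 = 1
      · simp only [pvAStep, h1]
        simp only [beq_self_eq_true, Bool.or_true, if_true]
        exact h s i
      · simp only [pvAStep, hb, Bool.false_eq_true, if_false]
        rw [if_neg (by simp [h2, h1])]
        exact h s i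

theorem pvInv_inner (l : List (Int × (Int × String))) (st : pvAState) (b : PySem.Set (String × Int))
    (h : pvInv st.2.2 b) :
    pvInv ((l.foldl pvAStep st).2.2)
      (l.foldl (fun b g => if g.2.1 == 0 then b.add (g.2.2, g.1) else b) b) := by
  induction l generalizing st b with
  | nil => exact h
  | cons g t ih =>
    simp only [List.foldl_cons]
    exact ih _ _ (pvInv_step st b g h)

theorem pvInv_outer (guesses : List (List (Int × String))) (st : pvAState) (b : PySem.Set (String × Int))
    (h : pvInv st.2.2 b) :
    pvInv ((guesses.foldl (fun st guess => (PySem.List.enumerate guess).foldl pvAStep st) st).2.2)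
      (guesses.foldl (fun b guess =>
        (PySem.List.enumerate guess).foldl (fun b g => if g.2.1 == 0 then b.add (g.2.2, g.1) else b) b) b) := by
  induction guesses generalizing st b with
  | nil => exact h
  | cons g t ih =>
    simp only [List.foldl_cons]
    exact ih _ _ (pvInv_inner _ st b h)

-- A's boolean loops: a foldl with a kill switch under two nested guards is `acc && all (not both)`
theorem pv_foldl_kill2 {α : Type} (c d : α → Bool) (l : List α) (a : Bool) :
    l.foldl (fun b p => if c p then (if d p then false else b) else b) a
      = (a && l.all (fun p => !(c p && d p))) := by
  induction l generalizing a with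
  | nil => simp
  | cons x t ih =>
    simp only [List.foldl_cons, List.all_cons, ih]
    by_cases hc : c x
    · by_cases hd : d x
      · rw [if_pos hc, if_pos hd]; simp [hc, hd]
      · rw [if_pos hc, if_neg hd]; simp [hc, hd]
    · rw [if_neg hc]; simp [hc]

-- if the key is absent its position list is empty, so membership implies key presence
theorem pv_contains_of_getD_mem (cant : PySem.Dict String (List Int)) (s : String) (i : Int)
    (h : i ∈ cant.getD s []) : cant.contains s = true := by
  by_contra hc
  simp only [Bool.not_eq_true] at hc
  rw [PySem.Dict.getD_of_not_contains _ _ hc] at h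
  simp at h

-- A computes the filter of words by "no enumerated character is a banned pair"
theorem pvA_filter (words : List String) (guesses : List (List (Int × String))) :
    words_not_containing_chars words guesses
      = words.filter (fun w => (PySem.List.enumerate w.toList).all
          (fun p => !((pvBanned guesses).contains (String.singleton p.2, p.1)))) := by
  unfold words_not_containing_chars
  simp only []
  set st := guesses.foldl (fun st guess => (PySem.List.enumerate guess).foldl pvAStep st)
      (PySem.Set.empty, PySem.Dict.empty, PySem.Dict.empty) with hst
  set can := st.2.1 with hcan
  set cant := st.2.2 with hcant
  have hinv : pvInv cant (pvBanned guesses) := by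
    rw [hcant, hst]
    apply pvInv_outer
    intro s i
    simp [PySem.Set.empty, PySem.Dict.empty, PySem.Dict.getD, PySem.Dict.get?]
  have hmem : ∀ (p : Int × Char),
      (pvBanned guesses).contains (String.singleton p.2, p.1)
        = (cant.contains (String.singleton p.2)
            && (cant.getD (String.singleton p.2) []).contains p.1) := by
    intro p
    rw [Bool.eq_iff_iff]
    simp only [PySem.Set.contains, List.contains_iff_mem, Bool.and_eq_true]
    rw [hinv (String.singleton p.2) p.1]
    constructor
    · intro hm; exact ⟨pv_contains_of_getD_mem _ _ _ hm, hm⟩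
    · intro ⟨_, hm⟩; exact hm
  have hbody : ∀ (acc : List String) (word : String),
      (if (PySem.List.enumerate word.toList).foldl (fun passed p =>
          if can.contains (String.singleton p.2) && cant.contains (String.singleton p.2) then
            if (cant.getD (String.singleton p.2) []).contains p.1 then false else passed
          else passed) true then
        if (PySem.List.enumerate word.toList).foldl (fun valid p =>
            if cant.contains (String.singleton p.2) then
              if (cant.getD (String.singleton p.2) []).contains p.1 then false else valid
            else valid) true then
          acc ++ [word]
        else acc
      else acc)
      = (if (PySem.List.enumerate word.toList).all
            (fun p => !((pvBanned guesses).contains (String.singleton p.2, p.1))) then acc ++ [word]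
         else acc) := by
    intro acc word
    rw [pv_foldl_kill2 (fun p : Int × Char =>
          can.contains (String.singleton p.2) && cant.contains (String.singleton p.2))
        (fun p : Int × Char => (cant.getD (String.singleton p.2) []).contains p.1),
       pv_foldl_kill2 (fun p : Int × Char => cant.contains (String.singleton p.2))
        (fun p : Int × Char => (cant.getD (String.singleton p.2) []).contains p.1),
       Bool.true_and, Bool.true_and]
    have h2 : (fun p : Int × Char => !((pvBanned guesses).contains (String.singleton p.2, p.1)))
        = (fun p : Int × Char => !(cant.contains (String.singleton p.2)
            && (cant.getD (String.singleton p.2) []).contains p.1)) := by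
      funext p
      rw [hmem p]
    rw [h2]
    by_cases hv : ((PySem.List.enumerate word.toList).all
        (fun p => !(cant.contains (String.singleton p.2)
            && (cant.getD (String.singleton p.2) []).contains p.1))) = true
    · have hp : ((PySem.List.enumerate word.toList).all
          (fun p => !(can.contains (String.singleton p.2) && cant.contains (String.singleton p.2)
              && (cant.getD (String.singleton p.2) []).contains p.1))) = true := by
        simp only [List.all_eq_true] at hv ⊢
        intro p hpmem
        have hvp := hv p hpmem
        simp only [Bool.not_eq_eq_eq_not, Bool.not_true, Bool.and_eq_false_iff] at hvp ⊢
        tauto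
      rw [hp, hv]
      simp
    · simp only [Bool.not_eq_true] at hv
      rw [hv]
      split <;> simp
  calc words.foldl (fun correct word =>
        if (PySem.List.enumerate word.toList).foldl (fun passed p =>
            if can.contains (String.singleton p.2) && cant.contains (String.singleton p.2) then
              if (cant.getD (String.singleton p.2) []).contains p.1 then false else passed
            else passed) true then
          if (PySem.List.enumerate word.toList).foldl (fun valid p =>
              if cant.contains (String.singleton p.2) then
                if (cant.getD (String.singleton p.2) []).contains p.1 then false else valid
              else valid) true then
            correct ++ [word]
          else correct
        else correct) []
      = words.foldl (fun correct word =>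
          if (PySem.List.enumerate word.toList).all
              (fun p => !((pvBanned guesses).contains (String.singleton p.2, p.1)))
          then correct ++ [word] else correct) [] := by
        apply List.foldl_ext
        intro acc word _
        exact hbody acc word
    _ = words.filter (fun w => (PySem.List.enumerate w.toList).all
          (fun p => !((pvBanned guesses).contains (String.singleton p.2, p.1)))) := by
        have := PySem.List.foldl_append_if
          (fun w : String => (PySem.List.enumerate w.toList).all
            (fun p => !((pvBanned guesses).contains (String.singleton p.2, p.1))))
          (fun w => w) words []
        simpa using this

-- membership in the banned set, inner loop
theorem pvBanned_inner_mem (l : List (Int × (Int × String))) (b : PySem.Set (String × Int))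
    (x : String × Int) :
    x ∈ l.foldl (fun b g => if g.2.1 == 0 then b.add (g.2.2, g.1) else b) b
      ↔ x ∈ b ∨ ∃ p ∈ l, p.2.1 = 0 ∧ (p.2.2, p.1) = x := by
  induction l generalizing b with
  | nil => simp
  | cons g t ih =>
    simp only [List.foldl_cons, List.mem_cons]
    rw [ih]
    by_cases h0 : g.2.1 = 0
    · rw [if_pos (by simp [h0]), PySem.Set.mem_add]
      constructor
      · rintro (⟨h | h⟩ | ⟨p, hp, hp0, hpx⟩)
        · exact Or.inl h
        · exact Or.inr ⟨g, Or.inl rfl, h0, h.symm⟩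
        · exact Or.inr ⟨p, Or.inr hp, hp0, hpx⟩
      · rintro (h | ⟨p, (rfl | hp), hp0, hpx⟩)
        · exact Or.inl (Or.inl h)
        · exact Or.inl (Or.inr hpx.symm)
        · exact Or.inr ⟨p, hp, hp0, hpx⟩
    · rw [if_neg (by simp [h0])]
      constructor
      · rintro (h | ⟨p, hp, hp0, hpx⟩)
        · exact Or.inl h
        · exact Or.inr ⟨p, Or.inr hp, hp0, hpx⟩
      · rintro (h | ⟨p, (rfl | hp), hp0, hpx⟩)
        · exact Or.inl h
        · exact absurd hp0 h0
        · exact Or.inr ⟨p, hp, hp0, hpx⟩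

theorem pvBanned_mem (guesses : List (List (Int × String))) (x : String × Int) :
    x ∈ pvBanned guesses
      ↔ ∃ g ∈ guesses, ∃ p ∈ PySem.List.enumerate g, p.2.1 = 0 ∧ (p.2.2, p.1) = x := by
  unfold pvBanned
  have gen : ∀ (gs : List (List (Int × String))) (b : PySem.Set (String × Int)),
      x ∈ gs.foldl (fun b guess =>
          (PySem.List.enumerate guess).foldl (fun b g =>
            if g.2.1 == 0 then b.add (g.2.2, g.1) else b) b) b
        ↔ x ∈ b ∨ ∃ g ∈ gs, ∃ p ∈ PySem.List.enumerate g, p.2.1 = 0 ∧ (p.2.2, p.1) = x := by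
    intro gs
    induction gs with
    | nil => simp
    | cons g t ih =>
      intro b
      simp only [List.foldl_cons, List.mem_cons]
      rw [ih, pvBanned_inner_mem]
      constructor
      · rintro (⟨h | ⟨p, hp, hp0, hpx⟩⟩ | ⟨gg, hgg, hrest⟩)
        · exact Or.inl h
        · exact Or.inr ⟨g, Or.inl rfl, p, hp, hp0, hpx⟩
        · exact Or.inr ⟨gg, Or.inr hgg, hrest⟩
      · rintro (h | ⟨gg, (rfl | hgg), hrest⟩)
        · exact Or.inl (Or.inl h)
        · exact Or.inl (Or.inr hrest)
        · exact Or.inr ⟨gg, hgg, hrest⟩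
  rw [gen]
  simp [PySem.Set.empty]

-- the longest word bounds every word length
theorem pv_le_foldl_maxlen (l : List String) (a : Int) :
    a ≤ l.foldl (fun m w => max m (w.toList.length : Int)) a := by
  induction l generalizing a with
  | nil => exact le_refl a
  | cons x t ih => exact le_trans (le_max_left _ _) (ih _)

theorem pv_len_le_maxlen (l : List String) (a : Int) (w : String) (hw : w ∈ l) :
    (w.toList.length : Int) ≤ l.foldl (fun m w => max m (w.toList.length : Int)) a := by
  induction l generalizing a with
  | nil => cases hw
  | cons x t ih =>
    rcases List.mem_cons.mp hw with rfl | hw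
    · exact le_trans (le_max_right _ _) (pv_le_foldl_maxlen t _)
    · exact ih _ hw

-- the status-0 below-maxlen (position, char) pairs collected by B's fold, inner loop
theorem pvBSeen_inner_mem (maxlen : Int) (l : List (Int × (Int × String)))
    (st : PySem.Set (Int × String) × List String) (x : Int × String) :
    x ∈ (l.foldl (pvBStep maxlen) st).1
      ↔ x ∈ st.1 ∨ ∃ p ∈ l, p.2.1 = 0 ∧ p.1 < maxlen ∧ (p.1, p.2.2) = x := by
  induction l generalizing st with
  | nil => simp
  | cons p t ih =>
    simp only [List.foldl_cons, List.mem_cons]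
    rw [ih]
    by_cases h0 : p.2.1 = 0 ∧ p.1 < maxlen
    · by_cases hc : st.1.contains (p.1, p.2.2) = true
      · have hcond0 : (p.2.1 == 0 && decide (p.1 < maxlen) && !(st.1.contains (p.1, p.2.2))) = false := by
          rw [hc]; simp
        rw [show pvBStep maxlen st p = st from by unfold pvBStep; rw [hcond0]; simp]
        have hcm : (p.1, p.2.2) ∈ st.1 := List.contains_iff_mem.mp hc
        constructor
        · rintro (h | ⟨q, hq, hq0, hql, hqx⟩)
          · exact Or.inl h
          · exact Or.inr ⟨q, Or.inr hq, hq0, hql, hqx⟩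
        · rintro (h | ⟨q, (rfl | hq), hq0, hql, hqx⟩)
          · exact Or.inl h
          · exact Or.inl (hqx ▸ hcm)
          · exact Or.inr ⟨q, hq, hq0, hql, hqx⟩
      · have hc' : st.1.contains (p.1, p.2.2) = false := eq_false_of_ne_true hc
        have hcond1 : (p.2.1 == 0 && decide (p.1 < maxlen) && !(st.1.contains (p.1, p.2.2))) = true := by
          rw [hc']; simp [h0.1, h0.2]
        rw [show pvBStep maxlen st p
            = (st.1.add (p.1, p.2.2), st.2.filter (pvKeepC (p.1, p.2.2))) from by
              unfold pvBStep; rw [hcond1]; simp]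
        simp only [PySem.Set.mem_add]
        constructor
        · rintro ((h | h) | ⟨q, hq, hq0, hql, hqx⟩)
          · exact Or.inl h
          · exact Or.inr ⟨p, Or.inl rfl, h0.1, h0.2, h.symm⟩
          · exact Or.inr ⟨q, Or.inr hq, hq0, hql, hqx⟩
        · rintro (h | ⟨q, (rfl | hq), hq0, hql, hqx⟩)
          · exact Or.inl (Or.inl h)
          · exact Or.inl (Or.inr hqx.symm)
          · exact Or.inr ⟨q, hq, hq0, hql, hqx⟩
    · have hcond2 : (p.2.1 == 0 && decide (p.1 < maxlen) && !(st.1.contains (p.1, p.2.2))) = false := by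
        rcases Decidable.not_and_iff_or_not.mp h0 with h | h <;> simp [h]
      rw [show pvBStep maxlen st p = st from by unfold pvBStep; rw [hcond2]; simp]
      constructor
      · rintro (h | ⟨q, hq, hq0, hql, hqx⟩)
        · exact Or.inl h
        · exact Or.inr ⟨q, Or.inr hq, hq0, hql, hqx⟩
      · rintro (h | ⟨q, (rfl | hq), hq0, hql, hqx⟩)
        · exact Or.inl h
        · exact absurd ⟨hq0, hql⟩ h0
        · exact Or.inr ⟨q, hq, hq0, hql, hqx⟩

theorem pvBSeen_mem (maxlen : Int) (guesses : List (List (Int × String)))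
    (st : PySem.Set (Int × String) × List String) (x : Int × String) :
    x ∈ (guesses.foldl (fun st guess => (PySem.List.enumerate guess).foldl (pvBStep maxlen) st) st).1
      ↔ x ∈ st.1 ∨ ∃ g ∈ guesses, ∃ p ∈ PySem.List.enumerate g,
          p.2.1 = 0 ∧ p.1 < maxlen ∧ (p.1, p.2.2) = x := by
  induction guesses generalizing st with
  | nil => simp
  | cons g t ih =>
    simp only [List.foldl_cons, List.mem_cons]
    rw [ih, pvBSeen_inner_mem]
    constructor
    · rintro (⟨h | ⟨q, hq, hrest⟩⟩ | ⟨gg, hgg, hrest⟩)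
      · exact Or.inl h
      · exact Or.inr ⟨g, Or.inl rfl, q, hq, hrest⟩
      · exact Or.inr ⟨gg, Or.inr hgg, hrest⟩
    · rintro (h | ⟨gg, (rfl | hgg), hrest⟩)
      · exact Or.inl (Or.inl h)
      · exact Or.inl (Or.inr hrest)
      · exact Or.inr ⟨gg, hgg, hrest⟩

-- B's loop invariant: remaining is always words filtered by the seen constraints
def pvBInv (words : List String) (st : PySem.Set (Int × String) × List String) : Prop :=
  st.2 = words.filter (fun w => st.1.all (fun c => pvKeepC c w))

theorem pvBInv_step (maxlen : Int) (words : List String)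
    (st : PySem.Set (Int × String) × List String) (p : Int × (Int × String))
    (h : pvBInv words st) : pvBInv words (pvBStep maxlen st p) := by
  by_cases hcond : (p.2.1 == 0 && decide (p.1 < maxlen) && !(st.1.contains (p.1, p.2.2))) = true
  · rw [show pvBStep maxlen st p
        = (st.1.add (p.1, p.2.2), st.2.filter (pvKeepC (p.1, p.2.2))) from by
          simp only [pvBStep, hcond, if_true]]
    have hc : st.1.contains (p.1, p.2.2) = false := by
      rcases Bool.and_eq_true _ _ |>.mp hcond with ⟨_, hnc⟩
      simpa using hnc
    unfold pvBInv at h ⊢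
    simp only []
    rw [h, List.filter_filter,
        show st.1.add (p.1, p.2.2) = st.1 ++ [(p.1, p.2.2)] from by
          unfold PySem.Set.add
          rw [show PySem.Set.contains st.1 (p.1, p.2.2) = false from hc]
          simp]
    apply List.filter_congr
    intro w _
    simp [List.all_append, Bool.and_comm]
  · rw [show pvBStep maxlen st p = st from by
        simp only [pvBStep, eq_false_of_ne_true hcond, Bool.false_eq_true, if_false]]
    exact h

theorem pvBInv_inner (maxlen : Int) (l : List (Int × (Int × String))) (words : List String)
    (st : PySem.Set (Int × String) × List String) (h : pvBInv words st) :
    pvBInv words (l.foldl (pvBStep maxlen) st) := by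
  induction l generalizing st with
  | nil => exact h
  | cons p t ih =>
    simp only [List.foldl_cons]
    exact ih _ (pvBInv_step maxlen words st p h)

theorem pvBInv_outer (maxlen : Int) (guesses : List (List (Int × String))) (words : List String)
    (st : PySem.Set (Int × String) × List String) (h : pvBInv words st) :
    pvBInv words (guesses.foldl (fun st guess =>
      (PySem.List.enumerate guess).foldl (pvBStep maxlen) st) st) := by
  induction guesses generalizing st with
  | nil => exact h
  | cons g t ih =>
    simp only [List.foldl_cons]
    exact ih _ (pvBInv_inner maxlen _ words st h)

-- the common meaning of both per-word tests
def pvQ (guesses : List (List (Int × String))) (w : String) : Prop :=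
  ∀ g ∈ guesses, ∀ p ∈ PySem.List.enumerate g, p.2.1 = 0 → pvKeepC (p.1, p.2.2) w = true

-- per word, A's "no enumerated character is banned" means every status-0 entry keeps w
theorem pv_bridgeA (guesses : List (List (Int × String))) (w : String) :
    ((PySem.List.enumerate w.toList).all
        (fun p => !((pvBanned guesses).contains (String.singleton p.2, p.1)))) = true
      ↔ pvQ guesses w := by
  simp only [List.all_eq_true]
  constructor
  · intro h g hg p hp h0
    unfold pvKeepC
    by_cases hlen : (w.toList.length : Int) ≤ p.1
    · rw [decide_eq_true hlen, Bool.true_or]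
    · obtain ⟨k, hk, hpk⟩ := (PySem.List.mem_enumerate_iff g 0 p).mp hp
      have hp1 : p.1 = (k : Int) := by rw [hpk]; simp
      have hklt : k < w.toList.length := by
        have hkk : (k : Int) < (w.toList.length : Int) := by
          rw [← hp1]; exact lt_of_not_ge hlen
        exact_mod_cast hkk
      rw [hp1, PySem.List.pyGet?_natCast, List.getElem?_eq_getElem hklt]
      rw [Bool.or_eq_true]
      right
      rw [Bool.not_eq_true', beq_eq_false_iff_ne]
      simp only [Option.map_some, ne_eq, Option.some.injEq]
      intro hc
      have hb : ((pvBanned guesses).contains (String.singleton w.toList[k], (k : Int))) = true := by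
        simp only [PySem.Set.contains, List.contains_iff_mem]
        rw [pvBanned_mem]
        exact ⟨g, hg, p, hp, h0, by rw [hc, hp1]⟩
      have hq : ((k : Int), w.toList[k]) ∈ PySem.List.enumerate w.toList :=
        (PySem.List.mem_enumerate_iff _ _ _).mpr ⟨k, hklt, by simp⟩
      have hcontr := h _ hq
      rw [hb] at hcontr
      simp at hcontr
  · intro h q hq
    obtain ⟨k, hk, hqk⟩ := (PySem.List.mem_enumerate_iff w.toList 0 q).mp hq
    have hq1 : q.1 = (k : Int) := by rw [hqk]; simp
    have hq2 : q.2 = w.toList[k] := by rw [hqk]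
    rw [hq1, hq2, Bool.not_eq_true']
    by_contra hcne
    rw [Bool.not_eq_false] at hcne
    simp only [PySem.Set.contains, List.contains_iff_mem] at hcne
    rw [pvBanned_mem] at hcne
    obtain ⟨g, hg, p, hp, hp0, hpx⟩ := hcne
    have hx2 : p.2.2 = String.singleton w.toList[k] := congrArg Prod.fst hpx
    have hx1 : p.1 = (k : Int) := congrArg Prod.snd hpx
    have hgp := h g hg p hp hp0
    unfold pvKeepC at hgp
    simp only [] at hgp
    rw [hx1, hx2, PySem.List.pyGet?_natCast, List.getElem?_eq_getElem hk] at hgp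
    have hdec : decide ((w.toList.length : Int) ≤ (k : Int)) = false := by
      rw [decide_eq_false_iff_not]
      omega
    rw [hdec, Bool.false_or] at hgp
    simp at hgp

-- per word, B's conjunction over the seen set means every status-0 entry keeps w
-- (constraints at positions ≥ maxlen ≥ len(w) keep w vacuously)
theorem pv_bridgeB (maxlen : Int) (guesses : List (List (Int × String))) (w : String)
    (hw : (w.toList.length : Int) ≤ maxlen) (seen : PySem.Set (Int × String))
    (hmem : ∀ x, x ∈ seen
      ↔ ∃ g ∈ guesses, ∃ p ∈ PySem.List.enumerate g,
          p.2.1 = 0 ∧ p.1 < maxlen ∧ (p.1, p.2.2) = x) :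
    (seen.all (fun c => pvKeepC c w)) = true ↔ pvQ guesses w := by
  simp only [List.all_eq_true]
  constructor
  · intro h g hg p hp h0
    by_cases hl : p.1 < maxlen
    · exact h _ ((hmem (p.1, p.2.2)).mpr ⟨g, hg, p, hp, h0, hl, rfl⟩)
    · unfold pvKeepC
      rw [decide_eq_true (le_trans hw (le_of_not_gt hl)), Bool.true_or]
  · intro h c hc
    obtain ⟨g, hg, p, hp, h0, _, hx⟩ := (hmem c).mp hc
    rw [← hx]
    exact h g hg p hp h0

-- ===== VERDICT (by name: the statement is the Claim_ definition above) =====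
theorem words_not_containing_chars_spec : Claim_equal_words_not_containing_chars := by
  intro words guesses _
  unfold Spec_words_not_containing_chars
  rw [pvA_filter]
  unfold words_not_containing_chars_alt
  simp only []
  set maxlen : Int := words.foldl (fun m w => max m (w.toList.length : Int)) 0 with hml
  set F := guesses.foldl (fun st guess =>
      (PySem.List.enumerate guess).foldl (pvBStep maxlen) st)
      ((PySem.Set.empty : PySem.Set (Int × String)), words) with hF
  have hinv : pvBInv words F := by
    rw [hF]
    apply pvBInv_outer
    unfold pvBInv
    simp [PySem.Set.empty]
  have hmem : ∀ x, x ∈ F.1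
      ↔ ∃ g ∈ guesses, ∃ p ∈ PySem.List.enumerate g,
          p.2.1 = 0 ∧ p.1 < maxlen ∧ (p.1, p.2.2) = x := by
    intro x
    rw [hF, pvBSeen_mem]
    simp [PySem.Set.empty]
  rw [hinv]
  apply List.filter_congr
  intro w hwmem
  rw [Bool.eq_iff_iff]
  exact (pv_bridgeA guesses w).trans
    (pv_bridgeB maxlen guesses w (pv_len_le_maxlen words 0 w hwmem) F.1 hmem).symm
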